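-- pv_equiv track=rewrite | github.com/TuhinKundu/keyphrase_gen | generate_graphs_transformers.py | error_values
-- ===== SOURCE A (Python) =====
-- def error_values(ppl_vector, truth_vector, min_lim, max_lim, interval):
--
--     error_counts = []
--
--     while min_lim<max_lim:
--         total = 0
--         errors = 0
--         for i, val in enumerate(ppl_vector):
--             if val >= min_lim and val < max_lim:
--                 total +=1
--                 if truth_vector[i] == 1:
--                     errors+=1
--             if val > max_lim:
--                 break
--         error_counts.append(errors)
--         min_lim+=interval
--     return error_counts
-- ===== SOURCE B (Python) =====
-- def error_values(ppl_vector, truth_vector, min_lim, max_lim, interval):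
--     # Bucket each positive-truth value by its window offset in a single pass, then
--     # suffix-sum the buckets (window k counts every bucket >= k).
--     if min_lim < max_lim:
--         n_windows = -((min_lim - max_lim) // interval)
--     else:
--         n_windows = 0
--     buckets = [0] * n_windows
--     for i, val in enumerate(ppl_vector):
--         if val > max_lim:
--             break
--         if min_lim <= val < max_lim and truth_vector[i] == 1:
--             buckets[(val - min_lim) // interval] += 1
--     counts = [0] * n_windows
--     run = 0
--     for k in range(n_windows - 1, -1, -1):
--         run += buckets[k]
--         counts[k] = run
--     return counts
-- ===== Notes on version B (the rewrite author's own statement) =====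
-- stated objective: alternative
-- what changed: Replaces the per-window rescan of ppl_vector with a single bucketing pass (each positive-truth in-range value goes to bucket (val-min_lim)//interval) followed by a suffix-sum over the buckets; it trades A's W scans of the data for one scan plus one pass over the W buckets.
import Mathlib
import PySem

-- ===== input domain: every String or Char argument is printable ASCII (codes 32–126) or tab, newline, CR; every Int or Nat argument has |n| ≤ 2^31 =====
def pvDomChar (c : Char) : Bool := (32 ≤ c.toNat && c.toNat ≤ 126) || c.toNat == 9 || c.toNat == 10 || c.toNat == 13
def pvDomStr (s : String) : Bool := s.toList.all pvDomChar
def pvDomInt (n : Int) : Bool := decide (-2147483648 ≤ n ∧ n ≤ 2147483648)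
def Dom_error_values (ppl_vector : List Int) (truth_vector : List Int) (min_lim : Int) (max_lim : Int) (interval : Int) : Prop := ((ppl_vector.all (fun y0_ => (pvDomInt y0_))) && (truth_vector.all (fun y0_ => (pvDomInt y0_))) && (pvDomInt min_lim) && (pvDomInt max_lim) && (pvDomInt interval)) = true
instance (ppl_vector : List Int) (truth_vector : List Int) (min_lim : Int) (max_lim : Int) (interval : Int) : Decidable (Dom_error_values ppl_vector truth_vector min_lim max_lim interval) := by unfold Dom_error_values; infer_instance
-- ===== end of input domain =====

-- B replaces A's per-window rescan of ppl_vector by one bucketing pass plus a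
-- suffix-sum over the buckets (objective: alternative algorithm, same result).

-- ===== PORT A =====
-- inner for-loop of A: scans ppl_vector with index i, counting window hits
-- (total) and positive-truth window hits (errors), breaking after an element > max_lim
def winLoop (truth : List Int) (lo max_lim : Int) : List Int → Nat → Int → Int → Int
  | [], _, _, errors => errors
  | v :: rest, i, total, errors =>
    let total' := if lo ≤ v ∧ v < max_lim then total + 1 else total
    let errors' := if lo ≤ v ∧ v < max_lim ∧ truth.getD i 0 = 1 then errors + 1 else errors
    if max_lim < v then errors' else winLoop truth lo max_lim rest (i + 1) total' errors'

-- outer while-loop of A; fuel (max_lim - min_lim).toNat suffices whenever the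
-- loop terminates (interval ≥ 1, each step raises lo by at least 1)
def evOuter (ppl truth : List Int) (max_lim interval : Int) : Nat → Int → List Int
  | 0, _ => []
  | f + 1, lo =>
    if lo < max_lim then
      winLoop truth lo max_lim ppl 0 0 0 :: evOuter ppl truth max_lim interval f (lo + interval)
    else []

def error_values (ppl_vector : List Int) (truth_vector : List Int) (min_lim : Int) (max_lim : Int) (interval : Int) : List Int :=
  evOuter ppl_vector truth_vector max_lim interval (max_lim - min_lim).toNat min_lim

-- ===== PORT B =====
-- B's single pass: bucket each positive-truth in-range value by (val-min)//interval
def bucketsLoop (truth : List Int) (mn mx iv : Int) : List Int → Nat → List Int → List Int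
  | [], _, b => b
  | v :: rest, i, b =>
    if mx < v then b
    else
      let b' := if mn ≤ v ∧ v < mx ∧ truth.getD i 0 = 1 then
                  let j := (PySem.Int.floordiv (v - mn) iv).toNat
                  b.set j (b.getD j 0 + 1)
                else b
      bucketsLoop truth mn mx iv rest (i + 1) b'

-- B's backwards running-sum loop building counts from the buckets
def suffixSums : List Int → List Int
  | [] => []
  | x :: xs => let s := suffixSums xs; (x + s.head?.getD 0) :: s

def error_values_alt (ppl_vector : List Int) (truth_vector : List Int) (min_lim : Int) (max_lim : Int) (interval : Int) : List Int :=
  suffixSums (bucketsLoop truth_vector min_lim max_lim interval ppl_vector 0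
    (List.replicate (if min_lim < max_lim then -(PySem.Int.floordiv (min_lim - max_lim) interval) else 0).toNat 0))

-- ===== PRECONDITION & SPEC =====
-- Pre_ excludes exactly the inputs on which A does not return: a non-positive
-- interval with min_lim < max_lim (infinite while-loop) and inputs where some
-- window element at an index ≥ len(truth_vector) is reached before any break
-- (IndexError on truth_vector[i]).
def Pre_error_values (ppl_vector : List Int) (truth_vector : List Int) (min_lim : Int) (max_lim : Int) (interval : Int) : Prop :=
  (min_lim < max_lim → 0 < interval) ∧
  (min_lim < max_lim → ∀ i ∈ List.range ppl_vector.length, truth_vector.length ≤ i →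
    ¬(min_lim ≤ ppl_vector.getD i 0 ∧ ppl_vector.getD i 0 < max_lim ∧
      ∀ j ∈ List.range i, ppl_vector.getD j 0 ≤ max_lim))
instance (ppl_vector : List Int) (truth_vector : List Int) (min_lim : Int) (max_lim : Int) (interval : Int) : Decidable (Pre_error_values ppl_vector truth_vector min_lim max_lim interval) := by unfold Pre_error_values; infer_instance

def pvWitness_error_values : List Int × List Int × Int × Int × Int := ([1, 2, 3], [1, 0, 1], 0, 4, 2)

def Spec_error_values (ppl_vector : List Int) (truth_vector : List Int) (min_lim : Int) (max_lim : Int) (interval : Int) (out : List Int) : Prop := out = error_values_alt ppl_vector truth_vector min_lim max_lim interval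
instance (ppl_vector : List Int) (truth_vector : List Int) (min_lim : Int) (max_lim : Int) (interval : Int) (out : List Int) : Decidable (Spec_error_values ppl_vector truth_vector min_lim max_lim interval out) := by unfold Spec_error_values; infer_instance

-- ===== CLAIM (what is proved, stated in full; the proofs are below) =====
def Claim_equal_error_values : Prop := ∀ (ppl_vector : List Int) (truth_vector : List Int) (min_lim : Int) (max_lim : Int) (interval : Int), Dom_error_values ppl_vector truth_vector min_lim max_lim interval → Pre_error_values ppl_vector truth_vector min_lim max_lim interval → Spec_error_values ppl_vector truth_vector min_lim max_lim interval (error_values ppl_vector truth_vector min_lim max_lim interval)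

-- ===== LEMMAS AND PROOFS =====

-- the per-window count both programs compute (same traversal, same break)
def cnt (truth : List Int) (lo mx : Int) : List Int → Nat → Int
  | [], _ => 0
  | v :: rest, i =>
    if mx < v then 0
    else (if lo ≤ v ∧ v < mx ∧ truth.getD i 0 = 1 then 1 else 0) + cnt truth lo mx rest (i + 1)

theorem winLoop_eq_cnt (truth : List Int) (lo mx : Int) (xs : List Int) :
    ∀ (i : Nat) (t e : Int), winLoop truth lo mx xs i t e = e + cnt truth lo mx xs i := by
  induction xs with
  | nil => intro i t e; simp [winLoop, cnt]
  | cons v rest ih =>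
    intro i t e
    simp only [winLoop, cnt, ih]
    split_ifs <;> omega

-- the list of window lower bounds produced by the while loop
def loVals (mx iv : Int) : Nat → Int → List Int
  | 0, _ => []
  | f + 1, lo => if lo < mx then lo :: loVals mx iv f (lo + iv) else []

theorem evOuter_eq_map (ppl truth : List Int) (mx iv : Int) :
    ∀ (f : Nat) (lo : Int),
      evOuter ppl truth mx iv f lo = (loVals mx iv f lo).map (fun l => cnt truth l mx ppl 0) := by
  intro f
  induction f with
  | zero => intro lo; simp [evOuter, loVals]
  | succ f ih =>
    intro lo
    simp only [evOuter, loVals]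
    split_ifs with h
    · simp [ih, winLoop_eq_cnt]
    · simp

theorem floordiv_nonneg_iff (a b : Int) (hb : 0 < b) :
    0 ≤ PySem.Int.floordiv a b ↔ 0 ≤ a := by
  have := PySem.Int.le_floordiv_iff_mul_le (q := 0) (a := a) (b := b) hb
  simpa using this

theorem loVals_eq_range (mx iv : Int) (hiv : 0 < iv) :
    ∀ (f : Nat) (lo : Int), (mx - lo).toNat ≤ f →
      loVals mx iv f lo = (List.range (-(PySem.Int.floordiv (lo - mx) iv)).toNat).map (fun k : Nat => lo + (k : Int) * iv) := by
  intro f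
  induction f with
  | zero =>
    intro lo hf
    have h0 : 0 ≤ PySem.Int.floordiv (lo - mx) iv := (floordiv_nonneg_iff _ _ hiv).mpr (by omega)
    have : (-(PySem.Int.floordiv (lo - mx) iv)).toNat = 0 := by omega
    simp [loVals, this]
  | succ f ih =>
    intro lo hf
    simp only [loVals]
    split_ifs with h
    · have hstep : (mx - (lo + iv)).toNat ≤ f := by omega
      rw [ih (lo + iv) hstep]
      have hshift : PySem.Int.floordiv (lo - mx) iv = PySem.Int.floordiv (lo + iv - mx) iv - 1 := by
        have he : lo + iv - mx = (lo - mx) + 1 * iv := by ring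
        rw [he, PySem.Int.floordiv_eq_ediv_of_pos hiv, PySem.Int.floordiv_eq_ediv_of_pos hiv,
          Int.add_mul_ediv_right _ _ (by omega : iv ≠ 0)]
        omega
      have hpos : 0 < -(PySem.Int.floordiv (lo - mx) iv) := by
        have : ¬ 0 ≤ PySem.Int.floordiv (lo - mx) iv := by
          rw [floordiv_nonneg_iff _ _ hiv]; omega
        omega
      have hB : (-(PySem.Int.floordiv (lo - mx) iv)).toNat
          = (-(PySem.Int.floordiv (lo + iv - mx) iv)).toNat + 1 := by omega
      rw [hB, List.range_succ_eq_map, List.map_cons, List.map_map]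
      refine congrArg₂ List.cons (by simp) ?_
      apply List.map_congr_left
      intro a _
      simp only [Function.comp_apply]
      push_cast
      ring
    · have h0 : 0 ≤ PySem.Int.floordiv (lo - mx) iv := (floordiv_nonneg_iff _ _ hiv).mpr (by omega)
      have : (-(PySem.Int.floordiv (lo - mx) iv)).toNat = 0 := by omega
      simp [this]

theorem headD_suffixSums (l : List Int) : (suffixSums l).head?.getD 0 = l.sum := by
  induction l with
  | nil => rfl
  | cons x xs ih => simp [suffixSums, ih]

theorem suffixSums_eq_map (l : List Int) :
    suffixSums l = (List.range l.length).map (fun k => (l.drop k).sum) := by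
  induction l with
  | nil => simp [suffixSums]
  | cons x xs ih =>
    simp only [suffixSums, List.length_cons, List.range_succ_eq_map, List.map_cons, List.map_map]
    refine congrArg₂ List.cons ?_ ?_
    · simp [headD_suffixSums]
    · rw [ih]
      apply List.map_congr_left
      intro a _
      simp

theorem sum_drop_set (b : List Int) :
    ∀ (j k : Nat) (x : Int), j < b.length →
      ((b.set j (b.getD j 0 + x)).drop k).sum = (b.drop k).sum + (if k ≤ j then x else 0) := by
  induction b with
  | nil => intro j k x h; simp at h
  | cons v bs ih =>
    intro j k x h
    match j, k with
    | 0, 0 =>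
      simp only [List.getD_cons_zero, List.set_cons_zero, List.drop_zero, List.sum_cons]
      simp
      omega
    | 0, k' + 1 =>
      simp [List.set_cons_zero]
    | j' + 1, 0 =>
      have hj' : j' < bs.length := by simpa using h
      have h2 := ih j' 0 x hj'
      simp only [List.drop_zero] at h2
      simp only [List.getD_cons_succ, List.set_cons_succ, List.drop_zero, List.sum_cons, h2]
      simp
      omega
    | j' + 1, k' + 1 =>
      have hj' : j' < bs.length := by simpa using h
      simp only [List.getD_cons_succ, List.set_cons_succ, List.drop_succ_cons]
      rw [ih j' k' x hj']
      have he : (k' + 1 ≤ j' + 1) ↔ (k' ≤ j') := by omega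
      simp only [he]

theorem bucketsLoop_length (truth : List Int) (mn mx iv : Int) :
    ∀ (xs : List Int) (i : Nat) (b : List Int),
      (bucketsLoop truth mn mx iv xs i b).length = b.length := by
  intro xs
  induction xs with
  | nil => intro i b; simp [bucketsLoop]
  | cons v rest ih =>
    intro i b
    simp only [bucketsLoop]
    split_ifs with h1 h2
    · rfl
    · rw [ih]; simp
    · rw [ih]

theorem bucketsLoop_drop_sum (truth : List Int) (mn mx iv : Int) (hiv : 0 < iv) :
    ∀ (xs : List Int) (i : Nat) (b : List Int),
      b.length = (-(PySem.Int.floordiv (mn - mx) iv)).toNat →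
      ∀ k : Nat,
        ((bucketsLoop truth mn mx iv xs i b).drop k).sum
          = (b.drop k).sum + cnt truth (mn + (k : Int) * iv) mx xs i := by
  intro xs
  induction xs with
  | nil => intro i b hb k; simp [bucketsLoop, cnt]
  | cons v rest ih =>
    intro i b hb k
    simp only [bucketsLoop, cnt]
    by_cases h1 : mx < v
    · simp [h1]
    · rw [if_neg h1, if_neg h1]
      by_cases h2 : mn ≤ v ∧ v < mx ∧ truth.getD i 0 = 1
      · rw [if_pos h2]
        obtain ⟨hmn, hvmx, ht⟩ := h2
        set j : Nat := (PySem.Int.floordiv (v - mn) iv).toNat with hjdef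
        have hfd0 : 0 ≤ PySem.Int.floordiv (v - mn) iv := (floordiv_nonneg_iff _ _ hiv).mpr (by omega)
        have hceil : mx - mn ≤ (-(PySem.Int.floordiv (mn - mx) iv)) * iv := by
          have hd := Int.ediv_mul_le (mn - mx) (by omega : iv ≠ 0)
          rw [PySem.Int.floordiv_eq_ediv_of_pos hiv]
          linarith
        have hlt : PySem.Int.floordiv (v - mn) iv < -(PySem.Int.floordiv (mn - mx) iv) := by
          rw [PySem.Int.floordiv_lt_iff_lt_mul hiv]
          linarith
        have hjlt : j < b.length := by rw [hb]; omega
        have hbr : ((k : Int) ≤ PySem.Int.floordiv (v - mn) iv) ↔ (k : Int) * iv ≤ v - mn :=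
          PySem.Int.le_floordiv_iff_mul_le hiv
        have hiff : (mn + (k : Int) * iv ≤ v) ↔ (k ≤ j) := by
          constructor
          · intro hle
            have hm : (k : Int) * iv ≤ v - mn := by linarith
            have := hbr.mpr hm
            omega
          · intro hle
            have hki : (k : Int) ≤ PySem.Int.floordiv (v - mn) iv := by omega
            have := hbr.mp hki
            linarith
        rw [ih (i + 1) _ (by rw [List.length_set]; exact hb) k, sum_drop_set b j k 1 hjlt]
        by_cases hk : k ≤ j
        · rw [if_pos hk, if_pos (show mn + (k : Int) * iv ≤ v ∧ v < mx ∧ truth.getD i 0 = 1 from ⟨hiff.mpr hk, hvmx, ht⟩)]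
          ring
        · rw [if_neg hk, if_neg (show ¬(mn + (k : Int) * iv ≤ v ∧ v < mx ∧ truth.getD i 0 = 1) from fun hg => hk (hiff.mp hg.1))]
          ring
      · rw [if_neg h2, ih (i + 1) b hb k]
        have hkiv : 0 ≤ (k : Int) * iv := mul_nonneg (Int.natCast_nonneg k) (le_of_lt hiv)
        have hno : ¬(mn + (k : Int) * iv ≤ v ∧ v < mx ∧ truth.getD i 0 = 1) := by
          rintro ⟨ha, hb2, hc⟩
          exact h2 ⟨by linarith, hb2, hc⟩
        rw [if_neg hno]
        ring

-- ===== VERDICT (by name: the statement is the Claim_ definition above) =====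
theorem error_values_spec : Claim_equal_error_values := by
  intro ppl truth mn mx iv _ hpre
  unfold Spec_error_values error_values error_values_alt
  by_cases hlt : mn < mx
  · have hiv : 0 < iv := hpre.1 hlt
    rw [evOuter_eq_map, loVals_eq_range mx iv hiv _ mn (le_refl _), List.map_map]
    rw [suffixSums_eq_map, bucketsLoop_length, List.length_replicate]
    rw [if_pos hlt]
    apply List.map_congr_left
    intro k _
    rw [bucketsLoop_drop_sum truth mn mx iv hiv ppl 0 _ (by simp) k]
    simp [Function.comp]
  · have hf : (mx - mn).toNat = 0 := by omega
    have hlen : (bucketsLoop truth mn mx iv ppl 0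
        (List.replicate (if mn < mx then -(PySem.Int.floordiv (mn - mx) iv) else 0).toNat 0)).length = 0 := by
      rw [bucketsLoop_length, List.length_replicate, if_neg hlt]
      simp
    rw [hf, List.length_eq_zero_iff.mp hlen]
    simp [evOuter, suffixSums]
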